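-- pv_equiv track=rewrite | github.com/samchristywork/number-naming | python/name_large_numbers.py | base_from_index
-- ===== SOURCE A (Python) =====
-- digit_prefixes = ['', 'un', 'duo', 'tres', 'quattuor', 'quin', 'ses', 'sept', 'octo', 'noven', ]
--
-- small_base = ['', 'million', 'billion', 'trillion', 'quadrillion', 'quintillion', 'sextillion', 'septillion', 'octillion', 'nonillion', ]
--
-- teens_base = ['', 'decillion', 'vigintillion', 'trigintillion', 'quadragintillion', 'quinquagintillion', 'sexagintillion', 'septuagintillion', 'octogintillion', 'nonagintillion', ]
--
-- def base_from_index(order):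
--     '''
--     Returns a string representing the base of a specified order.
--     Ex: 2 -> 'million', 3-> 'billion'
--
--     Parameters:
--         order: The desired 'order' or 'base' of the number.
--
--     Returns:
--         order_string: A string that represents the specified base.
--     '''
--
--     if not isinstance(order, int):
--         raise Exception('Must provide a number.')
--
--     if order < 0:
--         raise Exception('Number must be positive.')
--
--     if order > 100:
--         raise Exception('Number is too large.')
--
--     n = order
--
--     # Special case.
--     if n == 0:
--         return 'thousand'
--
--     # Special case.
--     if n == 100:
--         return 'centillion'
--
--     # Special case.
--     if n < 10:
--         return small_base[n]
--
--     n = [x for x in str(n)]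
--     order_string = ''
--     order_string += digit_prefixes[int(n[-1])]
--     if len(n) > 1:
--         order_string += teens_base[int(n[-2])]
--     return order_string
-- ===== SOURCE B (Python) =====
-- digit_prefixes = ['', 'un', 'duo', 'tres', 'quattuor', 'quin', 'ses', 'sept', 'octo', 'noven', ]
-- small_base = ['', 'million', 'billion', 'trillion', 'quadrillion', 'quintillion', 'sextillion', 'septillion', 'octillion', 'nonillion', ]
-- teens_base = ['', 'decillion', 'vigintillion', 'trigintillion', 'quadragintillion', 'quinquagintillion', 'sexagintillion', 'septuagintillion', 'octogintillion', 'nonagintillion', ]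
--
-- # Full table of all 101 base names, built once: index 0 is 'thousand',
-- # 1..9 are the small bases, 10*t+o is digit_prefixes[o]+teens_base[t], 100 is 'centillion'.
-- _NAMES = (['thousand']
--           + small_base[1:]
--           + [p + t for t in teens_base[1:] for p in digit_prefixes]
--           + ['centillion'])
--
-- def base_from_index(order):
--     if not isinstance(order, int):
--         raise Exception('Must provide a number.')
--     if order < 0:
--         raise Exception('Number must be positive.')
--     if order > 100:
--         raise Exception('Number is too large.')
--     return _NAMES[order]
-- ===== Notes on version B (the rewrite author's own statement) =====
-- stated objective: idiomatic
-- what changed: B replaces A's per-call branching and string-digit extraction with a single precomputed 101-entry lookup table (specials + small bases + a prefix-by-tens cross product) indexed directly by order.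
import Mathlib
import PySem

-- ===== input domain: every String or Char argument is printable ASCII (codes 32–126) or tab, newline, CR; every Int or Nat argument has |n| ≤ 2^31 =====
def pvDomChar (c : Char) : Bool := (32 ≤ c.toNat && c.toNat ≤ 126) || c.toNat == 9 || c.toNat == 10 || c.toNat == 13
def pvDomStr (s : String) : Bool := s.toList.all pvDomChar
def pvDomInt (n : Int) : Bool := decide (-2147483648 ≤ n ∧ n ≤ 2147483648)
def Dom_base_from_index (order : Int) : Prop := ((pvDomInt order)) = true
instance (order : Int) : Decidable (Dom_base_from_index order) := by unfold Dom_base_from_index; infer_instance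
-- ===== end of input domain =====

-- B builds one precomputed 101-entry name table and indexes it, replacing A's per-call branching and string-digit extraction (idiomatic; same O(1) cost).


def digitPrefixes : List String := ["", "un", "duo", "tres", "quattuor", "quin", "ses", "sept", "octo", "noven"]
def smallBase : List String := ["", "million", "billion", "trillion", "quadrillion", "quintillion", "sextillion", "septillion", "octillion", "nonillion"]
def teensBase : List String := ["", "decillion", "vigintillion", "trigintillion", "quadragintillion", "quinquagintillion", "sexagintillion", "septuagintillion", "octogintillion", "nonagintillion"]

-- ===== PORT A =====
-- A raises on order < 0 and order > 100 (excluded by Pre_); the port returns "" there.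
def base_from_index (order : Int) : String :=
  if order < 0 then ""          -- raise Exception('Number must be positive.')
  else if order > 100 then ""   -- raise Exception('Number is too large.')
  else
    let n := order
    if n = 0 then "thousand"
    else if n = 100 then "centillion"
    else if n < 10 then (PySem.List.pyGet? smallBase n).getD ""
    else
      -- n = [x for x in str(n)] : list of one-character strings
      let nl : List String := (PySem.Int.toStr n).toList.map (fun c => String.mk [c])
      let s1 := (PySem.List.pyGet? nl (-1)).bind PySem.Int.ofStr?
      let d1 := ((s1.bind (PySem.List.pyGet? digitPrefixes ·)).getD "")
      let order_string := "" ++ d1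
      if (nl.length : Int) > 1 then
        let s2 := (PySem.List.pyGet? nl (-2)).bind PySem.Int.ofStr?
        order_string ++ ((s2.bind (PySem.List.pyGet? teensBase ·)).getD "")
      else order_string

-- ===== PORT B =====
-- _NAMES: specials + small bases + cross product of prefixes over tens names.
def namesTable : List String :=
  ["thousand"] ++ smallBase.drop 1
    ++ (teensBase.drop 1).flatMap (fun t => digitPrefixes.map (fun p => p ++ t))
    ++ ["centillion"]

def base_from_index_alt (order : Int) : String :=
  if order < 0 then ""          -- raise
  else if order > 100 then ""   -- raise
  else (PySem.List.pyGet? namesTable order).getD ""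

-- ===== PRECONDITION & SPEC =====
-- Pre_ excludes exactly the inputs on which A raises: order < 0 or order > 100.
def Pre_base_from_index (order : Int) : Prop := 0 ≤ order ∧ order ≤ 100
instance (order : Int) : Decidable (Pre_base_from_index order) := by unfold Pre_base_from_index; infer_instance
def pvWitness_base_from_index : Int := (42)
def Spec_base_from_index (order : Int) (out : String) : Prop := out = base_from_index_alt order
instance (order : Int) (out : String) : Decidable (Spec_base_from_index order out) := by unfold Spec_base_from_index; infer_instance

-- ===== CLAIM =====
def Claim_equal_base_from_index : Prop := ∀ (order : Int), Dom_base_from_index order → Pre_base_from_index order → Spec_base_from_index order (base_from_index order)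

-- ===== LEMMAS AND PROOFS =====

-- ===== VERDICT =====
theorem base_from_index_spec : Claim_equal_base_from_index := by
  intro order _ hpre
  obtain ⟨h0, h1⟩ := hpre
  unfold Spec_base_from_index
  interval_cases order <;> decide
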